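-- pv_equiv track=rewrite | github.com/Vishwas1709/pentagon | Programming/Strings/anagram-21-07.py | anagramfiltrations
-- ===== SOURCE A (Python) =====
-- def anagramfiltrations(s1):
--     nstr=""
--     for i in range(len(s1)):
--         if "A" <= s1[i] <="Z":
--             nstr=nstr+chr(ord(s1[i])+32)
--         elif ("a" <= s1[i] <='z') or ('0'<=s1[i]<="9"):
--             nstr=nstr+s1[i]
--     return nstr
-- ===== SOURCE B (Python) =====
-- _TABLE = str.maketrans({chr(c): chr(c + 32) for c in range(ord("A"), ord("Z") + 1)})
-- _ALLOWED = set("abcdefghijklmnopqrstuvwxyz0123456789")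
--
-- def anagramfiltrations(s1):
--     t = s1.translate(_TABLE)
--     return "".join(c for c in t if c in _ALLOWED)
-- ===== Notes on version B (the rewrite author's own statement) =====
-- stated objective: faster
-- what changed: B replaces A's single classify-and-append loop (quadratic nstr = nstr + c concatenation) with a two-stage pipeline: a precomputed translate table folds ASCII uppercase to lowercase over the whole string, then a join over a filter keeps only characters in an explicit a-z0-9 set.
import Mathlib
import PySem

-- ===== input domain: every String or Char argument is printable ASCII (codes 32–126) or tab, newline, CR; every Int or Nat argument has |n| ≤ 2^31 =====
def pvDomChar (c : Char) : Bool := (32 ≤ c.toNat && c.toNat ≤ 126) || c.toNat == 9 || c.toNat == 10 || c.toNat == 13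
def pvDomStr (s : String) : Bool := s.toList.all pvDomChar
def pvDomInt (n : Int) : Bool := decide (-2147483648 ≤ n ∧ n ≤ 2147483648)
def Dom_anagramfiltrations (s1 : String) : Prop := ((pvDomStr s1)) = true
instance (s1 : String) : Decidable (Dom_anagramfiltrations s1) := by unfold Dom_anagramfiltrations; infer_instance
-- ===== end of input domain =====

-- B replaces A's single classify-and-append loop by a two-stage pipeline (translate table that
-- folds ASCII uppercase to lowercase, then a filter on an explicit a-z0-9 set); return value only.

-- ===== PORT A =====
-- chr(ord(s1[i])+32) ported as Char.ofNat (c.toNat + 32): exact here since that branch only fires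
-- for c in 'A'..'Z', where the code point arithmetic is the same.
def anagramfiltrations (s1 : String) : String :=
  String.mk (s1.toList.foldl (fun nstr c =>
    if 'A' ≤ c ∧ c ≤ 'Z' then nstr ++ [Char.ofNat (c.toNat + 32)]
    else if ('a' ≤ c ∧ c ≤ 'z') ∨ ('0' ≤ c ∧ c ≤ '9') then nstr ++ [c]
    else nstr) [])

-- ===== PORT B =====
-- _TABLE of Source B: maps each ASCII uppercase letter to its lowercase form, everything else unchanged
-- (same Char.ofNat exactness remark as in port A).
def pvTranslate (c : Char) : Char :=
  if 'A' ≤ c ∧ c ≤ 'Z' then Char.ofNat (c.toNat + 32) else c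

-- _ALLOWED of Source B: set("abcdefghijklmnopqrstuvwxyz0123456789") — its distinct elements as a list,
-- used only for membership tests.
def pvAllowedList : List Char :=
  ['a','b','c','d','e','f','g','h','i','j','k','l','m',
   'n','o','p','q','r','s','t','u','v','w','x','y','z',
   '0','1','2','3','4','5','6','7','8','9']

def pvAllowed (c : Char) : Bool := pvAllowedList.contains c

def anagramfiltrations_alt (s1 : String) : String :=
  String.mk ((s1.toList.map pvTranslate).filter pvAllowed)

-- ===== PRECONDITION & SPEC =====
def Spec_anagramfiltrations (s1 : String) (out : String) : Prop := out = anagramfiltrations_alt s1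
instance (s1 : String) (out : String) : Decidable (Spec_anagramfiltrations s1 out) := by unfold Spec_anagramfiltrations; infer_instance

-- ===== CLAIM (what is proved, stated in full; the proofs are below) =====
def Claim_equal_anagramfiltrations : Prop := ∀ (s1 : String), Dom_anagramfiltrations s1 → Spec_anagramfiltrations s1 (anagramfiltrations s1)

-- ===== LEMMAS AND PROOFS =====
lemma char_le_iff (c d : Char) : (c ≤ d) ↔ c.toNat ≤ d.toNat := by
  rw [Char.le_def, UInt32.le_iff_toNat_le]; exact Iff.rfl

lemma char_eq_iff (c d : Char) : c = d ↔ c.toNat = d.toNat := by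
  rw [Char.ext_iff, ← UInt32.toNat_inj]; exact Iff.rfl

lemma char_toNat_ofNat (n : Nat) (h : n < 0xD800) : (Char.ofNat n).toNat = n := by
  unfold Char.ofNat
  split
  · simp [Char.ofNatAux, Char.toNat]
  · exact absurd (Or.inl h) (by assumption)

lemma pvAllowed_iff (c : Char) :
    pvAllowed c = true ↔ (97 ≤ c.toNat ∧ c.toNat ≤ 122) ∨ (48 ≤ c.toNat ∧ c.toNat ≤ 57) := by
  simp only [pvAllowed, pvAllowedList, List.contains_cons, List.contains_nil, Bool.or_eq_true,
    beq_iff_eq, char_eq_iff, Bool.false_eq_true, or_false,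
    show ('a'.toNat = 97) from rfl, show ('b'.toNat = 98) from rfl, show ('c'.toNat = 99) from rfl,
    show ('d'.toNat = 100) from rfl, show ('e'.toNat = 101) from rfl, show ('f'.toNat = 102) from rfl,
    show ('g'.toNat = 103) from rfl, show ('h'.toNat = 104) from rfl, show ('i'.toNat = 105) from rfl,
    show ('j'.toNat = 106) from rfl, show ('k'.toNat = 107) from rfl, show ('l'.toNat = 108) from rfl,
    show ('m'.toNat = 109) from rfl, show ('n'.toNat = 110) from rfl, show ('o'.toNat = 111) from rfl,
    show ('p'.toNat = 112) from rfl, show ('q'.toNat = 113) from rfl, show ('r'.toNat = 114) from rfl,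
    show ('s'.toNat = 115) from rfl, show ('t'.toNat = 116) from rfl, show ('u'.toNat = 117) from rfl,
    show ('v'.toNat = 118) from rfl, show ('w'.toNat = 119) from rfl, show ('x'.toNat = 120) from rfl,
    show ('y'.toNat = 121) from rfl, show ('z'.toNat = 122) from rfl,
    show ('0'.toNat = 48) from rfl, show ('1'.toNat = 49) from rfl, show ('2'.toNat = 50) from rfl,
    show ('3'.toNat = 51) from rfl, show ('4'.toNat = 52) from rfl, show ('5'.toNat = 53) from rfl,
    show ('6'.toNat = 54) from rfl, show ('7'.toNat = 55) from rfl, show ('8'.toNat = 56) from rfl,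
    show ('9'.toNat = 57) from rfl]
  omega

-- loop invariant: A's fold with accumulator acc equals acc ++ B's map-filter pipeline
lemma anagram_fold_eq (l : List Char) : ∀ (acc : List Char),
    l.foldl (fun nstr c =>
      if 'A' ≤ c ∧ c ≤ 'Z' then nstr ++ [Char.ofNat (c.toNat + 32)]
      else if ('a' ≤ c ∧ c ≤ 'z') ∨ ('0' ≤ c ∧ c ≤ '9') then nstr ++ [c]
      else nstr) acc = acc ++ (l.map pvTranslate).filter pvAllowed := by
  induction l with
  | nil => intro acc; simp
  | cons c l ih =>
    intro acc
    simp only [List.foldl, List.map, List.filter]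
    by_cases hU : 'A' ≤ c ∧ c ≤ 'Z'
    · have h1 : 65 ≤ c.toNat := by
        have := (char_le_iff _ _).mp hU.1
        simpa only [show ('A'.toNat = 65) from rfl] using this
      have h2 : c.toNat ≤ 90 := by
        have := (char_le_iff _ _).mp hU.2
        simpa only [show ('Z'.toNat = 90) from rfl] using this
      have htn : (Char.ofNat (c.toNat + 32)).toNat = c.toNat + 32 :=
        char_toNat_ofNat _ (by omega)
      have hall : pvAllowed (Char.ofNat (c.toNat + 32)) = true := by
        rw [pvAllowed_iff, htn]; omega
      simp only [if_pos hU, ih, pvTranslate, hall, List.append_assoc, List.singleton_append]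
    · by_cases hL : ('a' ≤ c ∧ c ≤ 'z') ∨ ('0' ≤ c ∧ c ≤ '9')
      · have hall : pvAllowed c = true := by
          rw [pvAllowed_iff]
          rcases hL with ⟨h1, h2⟩ | ⟨h1, h2⟩ <;> rw [char_le_iff] at h1 h2
          · exact Or.inl ⟨h1, h2⟩
          · exact Or.inr ⟨h1, h2⟩
        simp only [if_neg hU, if_pos hL, ih, pvTranslate, hall, List.append_assoc,
          List.singleton_append]
      · have hall : pvAllowed c = false := by
          rw [Bool.eq_false_iff]
          intro hc
          rw [pvAllowed_iff] at hc
          apply hL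
          rcases hc with ⟨ha, hb⟩ | ⟨ha, hb⟩
          · refine Or.inl ⟨?_, ?_⟩ <;> rw [char_le_iff]
            · simpa only [show ('a'.toNat = 97) from rfl] using ha
            · simpa only [show ('z'.toNat = 122) from rfl] using hb
          · refine Or.inr ⟨?_, ?_⟩ <;> rw [char_le_iff]
            · simpa only [show ('0'.toNat = 48) from rfl] using ha
            · simpa only [show ('9'.toNat = 57) from rfl] using hb
        simp only [if_neg hU, if_neg hL, ih, pvTranslate, hall]

-- ===== VERDICT (by name: the statement is the Claim_ definition above) =====
theorem anagramfiltrations_spec : Claim_equal_anagramfiltrations := by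
  intro s1 _
  unfold Spec_anagramfiltrations anagramfiltrations anagramfiltrations_alt
  rw [anagram_fold_eq]
  simp
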